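-- pv_equiv track=rewrite | github.com/mjdaoudi/STIB-QoS-Analytics | custom_functions/gtfs_methods.py | cluster_assgnement
-- ===== SOURCE A (Python) =====
-- def cluster_assgnement(clusters: list[int]) -> list[int]:
--     clstrs = []
--     cluster_index = 0
--     for i in range(len(clusters)):
--         if i == 0:
--             clstrs.append([cluster_index for x in range(clusters[i])])
--         else:
--             clstrs.append([cluster_index for x in range(clusters[i - 1], clusters[i])])
--         cluster_index += 1
--     clusters_flatten = ["cluster_" + str(0)] + [
--         "cluster_" + str(cl) for sublist in clstrs for cl in sublist
--     ]
--     return clusters_flatten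
-- ===== SOURCE B (Python) =====
-- def cluster_assgnement(clusters: list[int]) -> list[int]:
--     # Right-to-left construction: treat the input as a stack, pop the last
--     # boundary, and emit that cluster's labels by counting DOWN to the
--     # previous boundary; everything is appended to a reversed buffer which
--     # is flipped once at the end (no difference table, no list-of-lists,
--     # no list multiplication).
--     stack = list(clusters)
--     rev = []
--     while stack:
--         c = stack.pop()
--         prev = stack[-1] if stack else 0
--         label = "cluster_" + str(len(stack))
--         p = c
--         while p > prev:
--             rev.append(label)
--             p -= 1
--     rev.reverse()
--     return ["cluster_0"] + rev
-- ===== Notes on version B (the rewrite author's own statement) =====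
-- stated objective: alternative
-- what changed: Replaces A's left-to-right index loop over nested range-comprehensions plus a flatten pass by a right-to-left stack algorithm: pop each boundary from the end, emit its labels by counting down to the previous boundary into a reversed buffer (no difference table, no range objects, no list-of-lists), then reverse the buffer once.
import Mathlib
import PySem

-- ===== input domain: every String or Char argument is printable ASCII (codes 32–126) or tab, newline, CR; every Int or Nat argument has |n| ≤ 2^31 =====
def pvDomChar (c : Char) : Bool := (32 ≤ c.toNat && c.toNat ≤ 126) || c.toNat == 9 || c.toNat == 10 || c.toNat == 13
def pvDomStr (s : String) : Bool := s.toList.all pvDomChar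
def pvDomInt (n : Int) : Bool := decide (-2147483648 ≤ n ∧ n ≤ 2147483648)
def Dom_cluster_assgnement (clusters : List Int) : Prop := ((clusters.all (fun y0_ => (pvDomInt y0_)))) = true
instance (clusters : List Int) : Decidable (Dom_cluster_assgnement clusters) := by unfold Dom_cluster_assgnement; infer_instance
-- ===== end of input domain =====

-- B replaces A's left-to-right index loop with nested range comprehensions and a flatten step
-- by a right-to-left stack algorithm: pop each boundary, count down to the previous one while
-- appending to a reversed buffer, and flip it once at the end; objective: alternative.

-- ===== PORT A =====
def cluster_assgnement (clusters : List Int) : List String :=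
  let st := (List.range clusters.length).foldl
    (fun (s : List (List Int) × Int) i =>
      if i = 0 then
        (s.1 ++ [(PySem.List.pyRange 0 (clusters.getD i 0) 1).map (fun _ => s.2)], s.2 + 1)
      else
        (s.1 ++ [(PySem.List.pyRange (clusters.getD (i - 1) 0) (clusters.getD i 0) 1).map
            (fun _ => s.2)], s.2 + 1))
    ([], 0)
  ("cluster_" ++ PySem.Int.toStr 0) ::
    st.1.flatMap (fun sub => sub.map (fun cl => "cluster_" ++ PySem.Int.toStr cl))

-- ===== PORT B =====
-- inner while-loop of B: append the label once per position, counting down from p to prev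
def pvSegDown (label : String) (p prev : Int) (rev : List String) : List String :=
  if prev < p then pvSegDown label (p - 1) prev (rev ++ [label]) else rev
termination_by (p - prev).toNat
decreasing_by omega

-- outer while-loop of B: pop the last boundary, emit its block into the reversed buffer
def pvStackLoop (stack : List Int) (rev : List String) : List String :=
  if h : stack = [] then rev  -- h used by decreasing_by
  else
    let c := stack.getLastD 0          -- stack.pop()
    let stack' := stack.dropLast
    let prev := stack'.getLastD 0      -- stack[-1] if stack else 0
    let label := "cluster_" ++ PySem.Int.toStr (stack'.length : Int)
    pvStackLoop stack' (pvSegDown label c prev rev)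
termination_by stack.length
decreasing_by
  simp only [List.length_dropLast]
  have := List.length_pos_of_ne_nil h
  omega

def cluster_assgnement_alt (clusters : List Int) : List String :=
  "cluster_0" :: (pvStackLoop clusters []).reverse

-- ===== PRECONDITION & SPEC =====
def Spec_cluster_assgnement (clusters : List Int) (out : List String) : Prop := out = cluster_assgnement_alt clusters
instance (clusters : List Int) (out : List String) : Decidable (Spec_cluster_assgnement clusters out) := by unfold Spec_cluster_assgnement; infer_instance

-- ===== CLAIM (what is proved, stated in full; the proofs are below) =====
def Claim_equal_cluster_assgnement : Prop := ∀ (clusters : List Int), Dom_cluster_assgnement clusters → Spec_cluster_assgnement clusters (cluster_assgnement clusters)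

-- ===== LEMMAS AND PROOFS =====

-- canonical form: the labels contributed by the tail, given previous cumulative value and index
def pvCore (prev : Int) (i : Int) : List Int → List String
  | [] => []
  | c :: rest => List.replicate (c - prev).toNat ("cluster_" ++ PySem.Int.toStr i) ++ pvCore c (i + 1) rest

-- the loop state of A's first pass
def pvAloop (clusters : List Int) : List (List Int) × Int :=
  (List.range clusters.length).foldl
    (fun (s : List (List Int) × Int) i =>
      if i = 0 then
        (s.1 ++ [(PySem.List.pyRange 0 (clusters.getD i 0) 1).map (fun _ => s.2)], s.2 + 1)
      else
        (s.1 ++ [(PySem.List.pyRange (clusters.getD (i - 1) 0) (clusters.getD i 0) 1).map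
            (fun _ => s.2)], s.2 + 1))
    ([], 0)

lemma getD_last (xs : List Int) : xs.getD (xs.length - 1) 0 = xs.getLastD 0 := by
  rw [List.getD_eq_getElem?_getD, List.getLastD_eq_getLast?, List.getLast?_eq_getElem?]

lemma aloop_inner (xs : List Int) (c : Int) :
    (List.range xs.length).foldl
      (fun (s : List (List Int) × Int) i =>
        if i = 0 then
          (s.1 ++ [(PySem.List.pyRange 0 ((xs ++ [c]).getD i 0) 1).map (fun _ => s.2)], s.2 + 1)
        else
          (s.1 ++ [(PySem.List.pyRange ((xs ++ [c]).getD (i - 1) 0) ((xs ++ [c]).getD i 0) 1).map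
              (fun _ => s.2)], s.2 + 1))
      ([], 0)
    = pvAloop xs := by
  unfold pvAloop
  apply PySem.List.foldl_congr_mem
  intro acc i hi
  have hi' : i < xs.length := List.mem_range.mp hi
  by_cases h0 : i = 0
  · subst h0
    rw [if_pos rfl, if_pos rfl, List.getD_append _ _ _ _ (by omega)]
  · rw [if_neg h0, if_neg h0, List.getD_append _ _ _ _ (by omega),
      List.getD_append _ _ _ _ (by omega)]

lemma aloop_concat (xs : List Int) (c : Int) :
    pvAloop (xs ++ [c])
      = ((pvAloop xs).1 ++ [(PySem.List.pyRange (xs.getLastD 0) c 1).map (fun _ => (pvAloop xs).2)],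
         (pvAloop xs).2 + 1) := by
  show (List.range (xs ++ [c]).length).foldl
      (fun (s : List (List Int) × Int) i =>
        if i = 0 then
          (s.1 ++ [(PySem.List.pyRange 0 ((xs ++ [c]).getD i 0) 1).map (fun _ => s.2)], s.2 + 1)
        else
          (s.1 ++ [(PySem.List.pyRange ((xs ++ [c]).getD (i - 1) 0) ((xs ++ [c]).getD i 0) 1).map
              (fun _ => s.2)], s.2 + 1))
      ([], 0)
    = ((pvAloop xs).1 ++ [(PySem.List.pyRange (xs.getLastD 0) c 1).map (fun _ => (pvAloop xs).2)],
       (pvAloop xs).2 + 1)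
  rw [show (xs ++ [c]).length = xs.length + 1 from by simp, List.range_succ, List.foldl_append,
    aloop_inner xs c]
  simp only [List.foldl_cons, List.foldl_nil]
  by_cases h0 : xs.length = 0
  · obtain rfl : xs = [] := List.eq_nil_of_length_eq_zero h0
    simp [pvAloop]
  · rw [if_neg h0]
    have hne : xs ≠ [] := by intro h; exact h0 (by simp [h])
    have ha : (xs ++ [c]).getD (xs.length - 1) 0 = xs.getLastD 0 := by
      rw [List.getD_append _ _ _ _ (by omega)]; exact getD_last xs
    have hb : (xs ++ [c]).getD xs.length 0 = c := by
      simp [List.getD_eq_getElem?_getD]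
    rw [ha, hb]

lemma pv_getLastD_cons (a d : Int) (l : List Int) : (a :: l).getLastD d = l.getLastD a := by
  cases l with
  | nil => simp
  | cons b t =>
      rw [List.getLastD_eq_getLast?, List.getLastD_eq_getLast?, List.getLast?_cons_cons]
      cases h : (b :: t).getLast? with
      | none => simp [List.getLast?_eq_none_iff] at h
      | some y => rfl

lemma core_concat (xs : List Int) : ∀ (prev i c : Int),
    pvCore prev i (xs ++ [c])
      = pvCore prev i xs
        ++ List.replicate ((c - xs.getLastD prev).toNat)
            ("cluster_" ++ PySem.Int.toStr (i + xs.length)) := by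
  induction xs with
  | nil => intro prev i c; simp [pvCore]
  | cons x rest ih =>
      intro prev i c
      simp only [List.cons_append, pvCore]
      rw [ih, pv_getLastD_cons]
      rw [show i + ((x :: rest).length : Int) = (i + 1) + (rest.length : Int) from by
        push_cast [List.length_cons]; ring]
      rw [List.append_assoc]

lemma aloop_eq (xs : List Int) :
    ((pvAloop xs).1.flatMap (fun sub => sub.map (fun cl => "cluster_" ++ PySem.Int.toStr cl)))
      = pvCore 0 0 xs ∧ (pvAloop xs).2 = (xs.length : Int) := by
  induction xs using List.reverseRecOn with
  | nil => exact ⟨rfl, rfl⟩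
  | append_singleton ys c ih =>
      obtain ⟨ih1, ih2⟩ := ih
      rw [aloop_concat]
      refine ⟨?_, ?_⟩
      · simp only [List.flatMap_append, List.flatMap_cons, List.flatMap_nil, List.append_nil]
        rw [ih1, core_concat]
        congr 1
        rw [ih2, List.map_map]
        simp only [Function.comp_def]
        rw [List.map_const', PySem.List.length_pyRange_one]
        simp
      · have hl : (((ys ++ [c]).length : Nat) : Int) = (ys.length : Int) + 1 := by simp
        rw [ih2, hl]

-- B's inner countdown loop appends the replicate of the gap
lemma segDown_eq (label : String) (prev : Int) : ∀ (p : Int) (rev : List String),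
    pvSegDown label p prev rev = rev ++ List.replicate (p - prev).toNat label := by
  have hk : ∀ k : Nat, ∀ p : Int, (p - prev).toNat = k → ∀ rev,
      pvSegDown label p prev rev = rev ++ List.replicate k label := by
    intro k
    induction k with
    | zero => intro p hp rev; rw [pvSegDown, if_neg (by omega)]; simp
    | succ n ihn =>
        intro p hp rev
        rw [pvSegDown, if_pos (by omega), ihn (p - 1) (by omega)]
        simp [List.replicate_succ, List.append_assoc]
  intro p rev
  exact hk _ p rfl rev

-- B's outer stack loop fills the buffer with the reversed canonical form
lemma stackLoop_eq (xs : List Int) : ∀ rev : List String,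
    pvStackLoop xs rev = rev ++ (pvCore 0 0 xs).reverse := by
  induction xs using List.reverseRecOn with
  | nil => intro rev; rw [pvStackLoop]; simp [pvCore]
  | append_singleton ys c ih =>
      intro rev
      rw [pvStackLoop]
      rw [dif_neg (by simp)]
      simp only [List.dropLast_concat, List.getLast?_concat, List.getLastD_eq_getLast?,
        Option.getD_some]
      rw [← List.getLastD_eq_getLast?, segDown_eq, ih, core_concat, zero_add,
        List.reverse_append, List.reverse_replicate, List.append_assoc]

-- ===== VERDICT (by name: the statement is the Claim_ definition above) =====
theorem cluster_assgnement_spec : Claim_equal_cluster_assgnement := by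
  intro clusters _
  unfold Spec_cluster_assgnement cluster_assgnement_alt
  rw [stackLoop_eq, List.nil_append, List.reverse_reverse]
  show ("cluster_" ++ PySem.Int.toStr 0) ::
      (pvAloop clusters).1.flatMap (fun sub => sub.map (fun cl => "cluster_" ++ PySem.Int.toStr cl))
    = "cluster_0" :: pvCore 0 0 clusters
  rw [(aloop_eq clusters).1]
  rfl
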